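-- pv_equiv track=rewrite | github.com/alexandershov/IdeaProjects | leetcode/maximum_split_of_positive_even_integers.py | maximumEvenSplit
-- ===== SOURCE A (Python) =====
-- def maximumEvenSplit(finalSum: int) -> list[int]:
--     # here's why it works:
--     # we find a sum of k consecutive evens such that
--     # sum() >= finalSum
--     # if sum() == finalSum, then we have an answer
--     # if sum() > finalSum, then the answer length is < k
--     # it can't be >= k, because we tried a minimal sum of first k evens
--     # we then construct a solution of length k - 1
--     # we remove the last item and increase second to last to correct amount
--     if finalSum % 2 == 1:
--         return []
--
--     result = []
--
--     cur_sum = 0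
--     item = 2
--     while cur_sum < finalSum:
--         cur_sum += item
--         result.append(item)
--         item += 2
--
--     if cur_sum == finalSum:
--         return result
--
--     last = result.pop()
--     extra = cur_sum - finalSum
--     cur_sum -= last
--     result[-1] += last - extra
--
--     return result
-- ===== SOURCE B (Python) =====
-- def maximumEvenSplit(finalSum: int) -> list[int]:
--     # Find the largest k with 2+4+...+2k = k*(k+1) <= finalSum, then emit the
--     # answer directly: the first k-1 evens plus one adjusted last term.
--     if finalSum % 2 == 1 or finalSum == 0:
--         return []
--     k = 1
--     while (k + 1) * (k + 2) <= finalSum: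
--         k += 1
--     return [2 * i for i in range(1, k)] + [2 * k + finalSum - k * (k + 1)]
-- ===== Notes on version B (the rewrite author's own statement) =====
-- stated objective: simpler
-- what changed: B counts the maximal k with k*(k+1) <= finalSum (undershoot bound) and emits the final list in one comprehension with the remainder folded into the last term, instead of A's overshoot-the-sum list building followed by pop and in-place repair of the last element.
import Mathlib
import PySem

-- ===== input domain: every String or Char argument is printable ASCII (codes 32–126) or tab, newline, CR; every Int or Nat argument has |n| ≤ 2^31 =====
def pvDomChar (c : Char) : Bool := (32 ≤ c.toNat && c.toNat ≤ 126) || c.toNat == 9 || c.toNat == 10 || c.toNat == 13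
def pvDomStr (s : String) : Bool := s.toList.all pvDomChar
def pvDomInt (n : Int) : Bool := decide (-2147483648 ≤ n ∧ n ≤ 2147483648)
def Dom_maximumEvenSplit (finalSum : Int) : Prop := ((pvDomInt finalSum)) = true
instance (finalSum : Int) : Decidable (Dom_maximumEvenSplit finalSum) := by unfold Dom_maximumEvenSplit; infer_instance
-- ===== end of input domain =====

-- B replaces A's overshoot-build-then-repair loop by counting the maximal k with
-- k*(k+1) ≤ finalSum and emitting the answer list directly (objective: simpler).

-- ===== PORT A =====
-- A's while loop; fuel is only a termination guard (finalSum.toNat + 1 always suffices,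
-- since the loop stops after at most finalSum iterations).
def mesLoopA (fuel : Nat) (n item cur : Int) (acc : List Int) : List Int × Int :=
  match fuel with
  | 0 => (acc, cur)
  | fuel + 1 =>
    if cur < n then mesLoopA fuel n (item + 2) (cur + item) (acc ++ [item])
    else (acc, cur)

-- A's code after the loop: r = (result, cur_sum); pop / result[-1] raise IndexError on an
-- empty list (Python's exception; only the inputs Pre_ excludes reach the `none` arms).
def mesFinish (finalSum : Int) (r : List Int × Int) : List Int :=
  if r.2 = finalSum then r.1
  else
    match r.1.getLast? with
    | none => []            -- result.pop() raises IndexError (outside Pre_)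
    | some last =>
      match r.1.dropLast.getLast? with
      | none => []          -- result[-1] raises IndexError (outside Pre_)
      | some l2 => r.1.dropLast.dropLast ++ [l2 + (last - (r.2 - finalSum))]

def maximumEvenSplit (finalSum : Int) : List Int :=
  if PySem.Int.mod finalSum 2 = 1 then []
  else mesFinish finalSum (mesLoopA (finalSum.toNat + 1) finalSum 2 0 [])

-- ===== PORT B =====
-- B's while loop; fuel is only a termination guard (finalSum.toNat + 1 always suffices).
def mesLoopB (fuel : Nat) (n k : Int) : Int :=
  match fuel with
  | 0 => k
  | fuel + 1 => if (k + 1) * (k + 2) ≤ n then mesLoopB fuel n (k + 1) else k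

-- B's return expression: [2*i for i in range(1, k)] + [2*k + finalSum - k*(k+1)]
def mesBuild (finalSum k : Int) : List Int :=
  (List.range (k - 1).toNat).map (fun i => 2 * ((i : Int) + 1)) ++ [2 * k + finalSum - k * (k + 1)]

def maximumEvenSplit_alt (finalSum : Int) : List Int :=
  if PySem.Int.mod finalSum 2 = 1 ∨ finalSum = 0 then []
  else mesBuild finalSum (mesLoopB (finalSum.toNat + 1) finalSum 1)

-- ===== PRECONDITION & SPEC =====
-- Pre_ excludes exactly the negative even inputs, on which Python A raises IndexError (pop from []).
def Pre_maximumEvenSplit (finalSum : Int) : Prop :=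
  PySem.Int.mod finalSum 2 = 1 ∨ 0 ≤ finalSum
instance (finalSum : Int) : Decidable (Pre_maximumEvenSplit finalSum) := by
  unfold Pre_maximumEvenSplit; infer_instance
def pvWitness_maximumEvenSplit : Int := (12)

def Spec_maximumEvenSplit (finalSum : Int) (out : List Int) : Prop := out = maximumEvenSplit_alt finalSum
instance (finalSum : Int) (out : List Int) : Decidable (Spec_maximumEvenSplit finalSum out) := by unfold Spec_maximumEvenSplit; infer_instance

-- ===== CLAIM (what is proved, stated in full; the proofs are below) =====
def Claim_equal_maximumEvenSplit : Prop := ∀ (finalSum : Int), Dom_maximumEvenSplit finalSum → Pre_maximumEvenSplit finalSum → Spec_maximumEvenSplit finalSum (maximumEvenSplit finalSum)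

-- ===== LEMMAS AND PROOFS =====

theorem stopA (fuel : Nat) (n item cur : Int) (acc : List Int) (hge : ¬ cur < n) :
    mesLoopA fuel n item cur acc = (acc, cur) := by
  cases fuel <;> simp [mesLoopA, hge]

-- the first j positive even integers
def evens (j : Nat) : List Int := (List.range j).map (fun i => 2 * ((i : Int) + 1))

theorem evens_succ (j : Nat) : evens (j + 1) = evens j ++ [2 * ((j : Int) + 1)] := by
  simp [evens, List.range_succ]

theorem sq_mono (a b : Int) (h0 : 0 ≤ a) (h : a ≤ b) : a * (a + 1) ≤ b * (b + 1) :=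
  mul_le_mul h (by omega) (by omega) (by omega)

-- A's post-loop code on a list ending in two known elements (the ≠ case: pop + repair)
theorem finish_concat (fs : Int) (l : List Int) (a b c : Int) (h : ¬ c = fs) :
    mesFinish fs (l ++ [a] ++ [b], c) = l ++ [a + (b - (c - fs))] := by
  simp [mesFinish, h, List.getLast?_append]

-- A's loop, at step j, ends at the minimal M with n ≤ M*(M+1)
theorem mesLoopA_spec (n : Int) (M : Nat) (hM1 : 1 ≤ M)
    (hlo : ((M : Int) - 1) * (M : Int) < n) (hhi : n ≤ (M : Int) * ((M : Int) + 1)) :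
    ∀ (fuel j : Nat) (item cur : Int) (acc : List Int),
      M ≤ j + fuel → item = 2 * ((j : Int) + 1) → cur = (j : Int) * ((j : Int) + 1) →
      acc = evens j → cur < n →
      mesLoopA fuel n item cur acc = (evens M, (M : Int) * ((M : Int) + 1)) := by
  intro fuel
  induction fuel with
  | zero =>
    intro j item cur acc hle hi hc ha hlt
    exfalso
    subst hc
    have hMj : (M : Int) ≤ (j : Int) := by exact_mod_cast hle
    have hmono : (M : Int) * ((M : Int) + 1) ≤ (j : Int) * ((j : Int) + 1) :=
      sq_mono _ _ (Int.natCast_nonneg M) hMj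
    linarith
  | succ fuel ih =>
    intro j item cur acc hle hi hc ha hlt
    subst hi; subst hc; subst ha
    simp only [mesLoopA, if_pos hlt]
    by_cases hnext : ((j : Int) + 1) * ((j : Int) + 2) < n
    · apply ih (j + 1)
      · omega
      · push_cast; ring
      · push_cast; ring
      · rw [evens_succ]
      · have e : (j : Int) * ((j : Int) + 1) + 2 * ((j : Int) + 1)
            = ((j : Int) + 1) * ((j : Int) + 2) := by ring
        rw [e]; exact hnext
    · push_neg at hnext
      have hstop : ¬ (j : Int) * ((j : Int) + 1) + 2 * ((j : Int) + 1) < n := by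
        have e : (j : Int) * ((j : Int) + 1) + 2 * ((j : Int) + 1)
            = ((j : Int) + 1) * ((j : Int) + 2) := by ring
        rw [e]; push_neg; exact hnext
      rw [stopA _ _ _ _ _ hstop]
      have hMeq : (M : Int) = (j : Int) + 1 := by
        rcases lt_trichotomy ((M : Int)) ((j : Int) + 1) with hx | hx | hx
        · exfalso
          have h1 : (M : Int) ≤ (j : Int) := by omega
          have : (M : Int) * ((M : Int) + 1) ≤ (j : Int) * ((j : Int) + 1) :=
            sq_mono _ _ (Int.natCast_nonneg M) h1
          linarith
        · exact hx
        · exfalso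
          have h1 : (j : Int) + 2 ≤ (M : Int) := by omega
          have h2 : ((j : Int) + 1) * (((j : Int) + 1) + 1) ≤ ((M : Int) - 1) * (((M : Int) - 1) + 1) :=
            sq_mono _ _ (by positivity) (by omega)
          have e1 : ((j : Int) + 1) * (((j : Int) + 1) + 1) = ((j : Int) + 1) * ((j : Int) + 2) := by ring
          have e2 : ((M : Int) - 1) * (((M : Int) - 1) + 1) = ((M : Int) - 1) * (M : Int) := by ring
          rw [e1, e2] at h2
          linarith
      have hMn : M = j + 1 := by exact_mod_cast hMeq
      subst hMn
      simp only [Prod.mk.injEq]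
      constructor
      · rw [evens_succ]
      · push_cast; ring

-- B's loop, at step j, returns the maximal K with K*(K+1) ≤ n
theorem mesLoopB_spec (n : Int) (K : Nat) (hK1 : 1 ≤ K)
    (hlo : (K : Int) * ((K : Int) + 1) ≤ n) (hhi : n < ((K : Int) + 1) * ((K : Int) + 2)) :
    ∀ (fuel j : Nat) (k : Int),
      K ≤ j + fuel → k = (j : Int) → (j : Int) * ((j : Int) + 1) ≤ n →
      mesLoopB fuel n k = (K : Int) := by
  have key : ∀ (j : Nat), (j : Int) * ((j : Int) + 1) ≤ n → ¬ ((j : Int) + 1) * ((j : Int) + 2) ≤ n → (j : Int) = (K : Int) := by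
    intro j hj hnext
    rcases lt_trichotomy ((j : Int)) ((K : Int)) with hx | hx | hx
    · exfalso
      have h1 : (j : Int) + 1 ≤ (K : Int) := by omega
      have h2 : ((j : Int) + 1) * (((j : Int) + 1) + 1) ≤ (K : Int) * ((K : Int) + 1) :=
        sq_mono _ _ (by positivity) h1
      have e : ((j : Int) + 1) * (((j : Int) + 1) + 1) = ((j : Int) + 1) * ((j : Int) + 2) := by ring
      rw [e] at h2
      exact hnext (le_trans h2 hlo)
    · exact hx
    · exfalso
      have h1 : (K : Int) + 1 ≤ (j : Int) := by omega
      have h2 : ((K : Int) + 1) * (((K : Int) + 1) + 1) ≤ (j : Int) * ((j : Int) + 1) :=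
        sq_mono _ _ (by positivity) h1
      have e : ((K : Int) + 1) * (((K : Int) + 1) + 1) = ((K : Int) + 1) * ((K : Int) + 2) := by ring
      rw [e] at h2
      linarith
  intro fuel
  induction fuel with
  | zero =>
    intro j k hle hk hj
    subst hk
    have hKj : (K : Int) ≤ (j : Int) := by exact_mod_cast hle
    by_cases hnext : ((j : Int) + 1) * ((j : Int) + 2) ≤ n
    · exfalso
      have h2 : ((K : Int) + 1) * (((K : Int) + 1) + 1) ≤ ((j : Int) + 1) * (((j : Int) + 1) + 1) :=
        sq_mono _ _ (by positivity) (by omega)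
      have e1 : ((K : Int) + 1) * (((K : Int) + 1) + 1) = ((K : Int) + 1) * ((K : Int) + 2) := by ring
      have e2 : ((j : Int) + 1) * (((j : Int) + 1) + 1) = ((j : Int) + 1) * ((j : Int) + 2) := by ring
      rw [e1, e2] at h2
      linarith
    · exact key j hj hnext
  | succ fuel ih =>
    intro j k hle hk hj
    subst hk
    by_cases hnext : ((j : Int) + 1) * ((j : Int) + 2) ≤ n
    · simp only [mesLoopB, if_pos hnext]
      apply ih (j + 1)
      · omega
      · push_cast; ring
      · have e : ((j + 1 : Nat) : Int) * (((j + 1 : Nat) : Int) + 1)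
            = ((j : Int) + 1) * ((j : Int) + 2) := by push_cast; ring
        rw [e]; exact hnext
    · simp only [mesLoopB, if_neg hnext]
      exact key j hj hnext

-- existence of the maximal K with K*(K+1) ≤ n, for n ≥ 2
theorem exists_K (n : Int) (h : 2 ≤ n) :
    ∃ K : Nat, 1 ≤ K ∧ (K : Int) * ((K : Int) + 1) ≤ n ∧ n < ((K : Int) + 1) * ((K : Int) + 2) := by
  have hP : ∃ m : Nat, n < ((m : Int) + 1) * ((m : Int) + 2) := by
    refine ⟨n.toNat, ?_⟩
    have h1 : (n.toNat : Int) = n := Int.toNat_of_nonneg (by omega)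
    have h2 : n + 1 ≤ (n + 1) * (n + 2) := le_mul_of_one_le_right (by omega) (by omega)
    rw [h1]
    linarith
  have hmain : n < ((Nat.find hP : Int) + 1) * ((Nat.find hP : Int) + 2) := Nat.find_spec hP
  have hK0 : Nat.find hP ≠ 0 := by
    intro h0
    rw [h0] at hmain
    push_cast at hmain
    linarith
  refine ⟨Nat.find hP, by omega, ?_, hmain⟩
  have hmin := Nat.find_min hP (m := Nat.find hP - 1) (by omega)
  push_neg at hmin
  have hcast : ((Nat.find hP - 1 : Nat) : Int) = (Nat.find hP : Int) - 1 := by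
    have : 1 ≤ Nat.find hP := by omega
    omega
  rw [hcast] at hmin
  have e : ((Nat.find hP : Int) - 1 + 1) * ((Nat.find hP : Int) - 1 + 2)
      = (Nat.find hP : Int) * ((Nat.find hP : Int) + 1) := by ring
  rw [e] at hmin
  exact hmin

theorem even_of_mod_ne_one (n : Int) (h : PySem.Int.mod n 2 ≠ 1) : 2 ∣ n := by
  have h1 := PySem.Int.mod_nonneg (a := n) (b := 2) (by omega)
  have h2 := PySem.Int.mod_lt (a := n) (b := 2) (by omega)
  have h0 : PySem.Int.mod n 2 = 0 := by omega
  exact (PySem.Int.mod_eq_zero_iff_dvd n 2).mp h0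

-- B's built list at the exact-fit K is the list of the first K evens
theorem build_exact (n : Int) (K : Nat) (hK1 : 1 ≤ K)
    (heq : (K : Int) * ((K : Int) + 1) = n) :
    mesBuild n (K : Int) = evens K := by
  obtain ⟨K', rfl⟩ : ∃ K', K = K' + 1 := ⟨K - 1, by omega⟩
  unfold mesBuild
  have hc : (((K' + 1 : Nat) : Int) - 1).toNat = K' := by
    push_cast; omega
  rw [hc, evens_succ]
  show evens K' ++ _ = evens K' ++ _
  congr 2
  push_cast at heq ⊢
  linarith [heq]

theorem maximumEvenSplit_spec_aux : ∀ (finalSum : Int),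
    Pre_maximumEvenSplit finalSum →
    maximumEvenSplit finalSum = maximumEvenSplit_alt finalSum := by
  intro n hPre
  unfold maximumEvenSplit maximumEvenSplit_alt
  by_cases hodd : PySem.Int.mod n 2 = 1
  · rw [if_pos hodd, if_pos (Or.inl hodd)]
  · rw [if_neg hodd]
    have hnn : 0 ≤ n := hPre.resolve_left hodd
    have heven : 2 ∣ n := even_of_mod_ne_one n hodd
    by_cases h0 : n = 0
    · subst h0
      rw [if_pos (Or.inr rfl)]
      rw [stopA _ 0 2 0 [] (by omega)]
      unfold mesFinish
      norm_num
    · have h2 : 2 ≤ n := by omega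
      rw [if_neg (by push_neg; exact ⟨hodd, h0⟩)]
      obtain ⟨K, hK1, hKlo, hKhi⟩ := exists_K n h2
      have hKn : (K : Int) ≤ n := by
        have : (K : Int) ≤ (K : Int) * ((K : Int) + 1) :=
          le_mul_of_one_le_right (Int.natCast_nonneg K) (by omega)
        linarith
      have hB : mesLoopB (n.toNat + 1) n 1 = (K : Int) :=
        mesLoopB_spec n K hK1 hKlo hKhi (n.toNat + 1) 1 1 (by omega) (by norm_num)
          (by push_cast; linarith)
      rw [hB]
      by_cases heq : (K : Int) * ((K : Int) + 1) = n
      · -- exact fit: A stops with sum = n and returns the first K evens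
        have hgap : ((K : Int) - 1) * (K : Int) < n := by
          have : ((K : Int) - 1) * (K : Int) < (K : Int) * ((K : Int) + 1) := by
            have h1 : 0 ≤ ((K : Int) - 1) * (K : Int) :=
              mul_nonneg (by omega) (by omega)
            nlinarith
          linarith
        have hA : mesLoopA (n.toNat + 1) n 2 0 [] = (evens K, (K : Int) * ((K : Int) + 1)) := by
          apply mesLoopA_spec n K hK1 hgap (le_of_eq heq.symm)
            (n.toNat + 1) 0 2 0 [] (by omega) (by norm_num) (by norm_num) (by simp [evens])
          linarith
        rw [hA]
        unfold mesFinish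
        rw [if_pos (show ((evens K, (K : Int) * ((K : Int) + 1)).2 = n) from heq)]
        exact (build_exact n K hK1 heq).symm
      · -- overshoot: A stops at K+1, pops, repairs the last element
        have hKlt : (K : Int) * ((K : Int) + 1) < n := lt_of_le_of_ne hKlo heq
        have hA : mesLoopA (n.toNat + 1) n 2 0 []
            = (evens (K + 1), ((K + 1 : Nat) : Int) * (((K + 1 : Nat) : Int) + 1)) := by
          apply mesLoopA_spec n (K + 1) (by omega) (by push_cast; linarith)
            (by push_cast; linarith) (n.toNat + 1) 0 2 0 [] (by omega) (by norm_num)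
            (by norm_num) (by simp [evens])
          linarith
        rw [hA]
        obtain ⟨K', rfl⟩ : ∃ K', K = K' + 1 := ⟨K - 1, by omega⟩
        rw [show evens (K' + 1 + 1)
              = evens K' ++ [2 * ((K' : Int) + 1)] ++ [2 * (((K' + 1 : Nat) : Int) + 1)] from by
            rw [evens_succ, evens_succ]]
        rw [finish_concat n _ _ _ _ (by
          push_cast
          intro hh
          push_cast at hKhi
          nlinarith [hKhi])]
        unfold mesBuild
        rw [show ((((K' + 1 : Nat) : Int)) - 1).toNat = K' from by push_cast; omega]
        congr 1
        simp only [List.cons.injEq, and_true]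
        push_cast
        push_cast at hKhi hKlt
        ring

-- ===== VERDICT (by name: the statement is the Claim_ definition above) =====
theorem maximumEvenSplit_spec : Claim_equal_maximumEvenSplit := by
  intro finalSum hDom hPre
  exact maximumEvenSplit_spec_aux finalSum hPre
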